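-- pv_equiv track=rewrite | github.com/bcgov/nr-optimize-metabase-api | push-data-to-metabase/push_sfp_owners_to_metabase.py | condense_share_info
-- ===== SOURCE A (Python) =====
-- def condense_share_info(record_tuples):
--     share_dict = {}
--     for row in record_tuples:
--         if row[0].lower() == 'share name':
--             continue
--         share_name = row[0]
--         new_entry = {
--                 'possible_owner': row[1],
--                 'possible_owner_title': row[2],
--                 'ownership_hierarchy': row[3],
--                 'comment': row[4],
--         }
--         # if new share or higher ownership hierarchy
--         if share_name not in share_dict or share_dict[share_name]['ownership_hierarchy'] < new_entry['ownership_hierarchy']: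
--             share_dict[share_name] = new_entry
--     return share_dict
-- ===== SOURCE B (Python) =====
-- def condense_share_info(record_tuples):
--     # first pass: group entries per share name (insertion order preserved)
--     groups = {}
--     for row in record_tuples:
--         if row[0].lower() == 'share name':
--             continue
--         groups.setdefault(row[0], []).append({
--                 'possible_owner': row[1],
--                 'possible_owner_title': row[2],
--                 'ownership_hierarchy': row[3],
--                 'comment': row[4],
--         })
--     # second pass: keep the first entry with the highest ownership hierarchy
--     return {name: max(entries, key=lambda e: e['ownership_hierarchy'])
--             for name, entries in groups.items()}
-- ===== Notes on version B (the rewrite author's own statement) =====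
-- stated objective: alternative
-- what changed: A maintains a running best entry per share inline in one dict pass; B first groups all non-header entries per share name into lists, then selects each group's first maximal-hierarchy entry with max(key=...) in a second pass.
import Mathlib
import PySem

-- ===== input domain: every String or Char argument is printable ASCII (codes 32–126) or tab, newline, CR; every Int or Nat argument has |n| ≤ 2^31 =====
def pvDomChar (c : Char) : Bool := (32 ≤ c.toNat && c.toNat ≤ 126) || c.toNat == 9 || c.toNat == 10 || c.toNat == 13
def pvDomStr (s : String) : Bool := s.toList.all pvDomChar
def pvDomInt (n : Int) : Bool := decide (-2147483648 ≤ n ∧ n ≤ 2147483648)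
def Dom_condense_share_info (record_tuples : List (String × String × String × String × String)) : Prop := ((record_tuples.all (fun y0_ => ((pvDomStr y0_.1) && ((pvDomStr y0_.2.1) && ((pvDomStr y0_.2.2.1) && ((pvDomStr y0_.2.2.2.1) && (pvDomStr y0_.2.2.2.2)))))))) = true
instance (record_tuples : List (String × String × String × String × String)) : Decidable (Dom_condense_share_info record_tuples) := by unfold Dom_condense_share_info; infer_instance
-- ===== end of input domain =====

-- B separates grouping from selection: one pass builds a dict of entry lists per share name,
-- a second pass picks each group's first maximal-hierarchy entry (alternative decomposition, same cost).


-- ===== PORT A =====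
-- the entry dict a row becomes (same literal dict in both Pythons)
def pvEntry (row : String × String × String × String × String) : List (String × String) :=
  [("possible_owner", row.2.1), ("possible_owner_title", row.2.2.1),
   ("ownership_hierarchy", row.2.2.2.1), ("comment", row.2.2.2.2)]

-- e['ownership_hierarchy'] on an entry dict; Python's '<' on strings is ported as the
-- lexicographic order on char lists (exact: both compare code points left to right)
def pvHier (e : List (String × String)) : List Char :=
  (((PySem.Dict.mk e).get? "ownership_hierarchy").getD "").toList

def condense_share_info (record_tuples : List (String × String × String × String × String)) : List (String × List (String × String)) :=
  (record_tuples.foldl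
    (fun (d : PySem.Dict String (List (String × String))) row =>
      if PySem.Str.lower row.1 = "share name" then d
      else
        let e := pvEntry row
        if !(d.contains row.1) || decide (pvHier ((d.get? row.1).getD []) < pvHier e)
        then d.insert row.1 e else d)
    PySem.Dict.empty).items

-- ===== PORT B =====
def condense_share_info_alt (record_tuples : List (String × String × String × String × String)) : List (String × List (String × String)) :=
  let groups : PySem.Dict String (List (List (String × String))) :=
    record_tuples.foldl
      (fun g row =>
        if PySem.Str.lower row.1 = "share name" then g
        else g.modify row.1 [] (· ++ [pvEntry row]))
      PySem.Dict.empty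
  -- max(entries, key=...) returns the first entry with maximal key; groups are nonempty so .getD [] never fires
  groups.items.map (fun p => (p.1, (PySem.List.max? p.2 pvHier).getD []))

-- ===== PRECONDITION & SPEC =====
def Spec_condense_share_info (record_tuples : List (String × String × String × String × String)) (out : List (String × List (String × String))) : Prop := out = condense_share_info_alt record_tuples
instance (record_tuples : List (String × String × String × String × String)) (out : List (String × List (String × String))) : Decidable (Spec_condense_share_info record_tuples out) := by unfold Spec_condense_share_info; infer_instance

-- ===== CLAIM (what is proved, stated in full; the proofs are below) =====
def Claim_equal_condense_share_info : Prop := ∀ (record_tuples : List (String × String × String × String × String)), Dom_condense_share_info record_tuples → Spec_condense_share_info record_tuples (condense_share_info record_tuples)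

-- ===== LEMMAS AND PROOFS =====

-- select the first maximal-hierarchy entry of a group
def pvSel (es : List (List (String × String))) : List (String × String) :=
  (PySem.List.max? es pvHier).getD []

def pvMapVals (l : List (String × List (List (String × String)))) : List (String × List (String × String)) :=
  l.map (fun p => (p.1, pvSel p.2))

theorem pv_max?_append (es : List (List (String × String))) (e : List (String × String)) :
    PySem.List.max? (es ++ [e]) pvHier =
      match PySem.List.max? es pvHier with
      | none => some e
      | some m => if pvHier m < pvHier e then some e else some m := by
  simp only [PySem.List.max?, List.foldl_append, List.foldl_cons, List.foldl_nil]
  rcases List.foldl _ none es with _ | m <;> rfl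

theorem pv_find?_map_vals (l : List (String × List (List (String × String)))) (k : String) :
    (pvMapVals l).find? (fun p => p.1 == k) =
      (l.find? (fun p => p.1 == k)).map (fun p => (p.1, pvSel p.2)) := by
  induction l with
  | nil => rfl
  | cons a t ih =>
    by_cases h : a.1 == k <;> simp [pvMapVals, List.find?, h] at ih ⊢ <;> simpa [pvMapVals] using ih

theorem pv_any_map_vals (l : List (String × List (List (String × String)))) (k : String) :
    (pvMapVals l).any (fun p => p.1 == k) = l.any (fun p => p.1 == k) := by
  induction l with
  | nil => rfl
  | cons a t ih => simp [pvMapVals, List.any_cons] at ih ⊢; by_cases h : a.1 = k <;> simp [h, ih]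

theorem pv_replace_self {β : Type} (l : List (String × β)) (k : String) (v : β)
    (hnd : (l.map (·.1)).Nodup)
    (hf : l.find? (fun p => p.1 == k) = some (k, v)) :
    l.map (fun p => if p.1 == k then (k, v) else p) = l := by
  induction l with
  | nil => simp at hf
  | cons a t ih =>
    rw [List.map_cons] at hnd
    rcases List.nodup_cons.mp hnd with ⟨hna, hnt⟩
    by_cases h : (a.1 == k) = true
    · simp only [List.find?_cons, h] at hf
      have ha : a = (k, v) := by injection hf
      subst ha
      rw [List.map_cons, if_pos h]
      have hak : (k : String) ∉ t.map (·.1) := by simpa using hna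
      have hrepl : ∀ p ∈ t, (if (p.1 == k) = true then (k, v) else p) = p := by
        intro p hp
        have hpk : p.1 ≠ k := by
          intro hk
          exact hak (hk ▸ (List.mem_map_of_mem hp : p.1 ∈ t.map (·.1)))
        simp [hpk]
      rw [List.map_congr_left hrepl]; simp
    · simp only [List.find?_cons, Bool.of_not_eq_true h] at hf
      rw [List.map_cons, if_neg h, ih hnt hf]

-- named copies of the two loop bodies, used only by the proofs below
def pvStepA (d : PySem.Dict String (List (String × String))) (row : String × String × String × String × String) : PySem.Dict String (List (String × String)) :=
  if PySem.Str.lower row.1 = "share name" then d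
  else
    let e := pvEntry row
    if !(d.contains row.1) || decide (pvHier ((d.get? row.1).getD []) < pvHier e)
    then d.insert row.1 e else d

def pvStepB (g : PySem.Dict String (List (List (String × String)))) (row : String × String × String × String × String) : PySem.Dict String (List (List (String × String))) :=
  if PySem.Str.lower row.1 = "share name" then g
  else g.modify row.1 [] (· ++ [pvEntry row])

theorem pvSel_single (e : List (String × String)) : pvSel [e] = e := rfl

theorem pv_mapVals_append (a b : List (String × List (List (String × String)))) :
    pvMapVals (a ++ b) = pvMapVals a ++ pvMapVals b := by
  simp [pvMapVals]

theorem pv_mapVals_replace (l : List (String × List (List (String × String)))) (k : String)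
    (v : List (List (String × String))) :
    pvMapVals (l.map (fun p => if p.1 == k then (k, v) else p))
      = (pvMapVals l).map (fun q => if q.1 == k then (k, pvSel v) else q) := by
  simp only [pvMapVals, List.map_map]
  apply List.map_congr_left
  intro p _
  by_cases h : p.1 = k <;> simp [h]

-- one step of A through pvMapVals is one step of B
theorem pv_step (g : PySem.Dict String (List (List (String × String))))
    (row : String × String × String × String × String)
    (hnd : (g.items.map (·.1)).Nodup) (hne : ∀ p ∈ g.items, p.2 ≠ []) :
    pvStepA (PySem.Dict.mk (pvMapVals g.items)) row = PySem.Dict.mk (pvMapVals ((pvStepB g row).items)) := by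
  by_cases hskip : PySem.Str.lower row.1 = "share name"
  · simp [pvStepA, pvStepB, hskip]
  · unfold pvStepA pvStepB
    rw [if_neg hskip, if_neg hskip]
    have hcontains : (PySem.Dict.mk (pvMapVals g.items)).contains row.1
        = g.items.any (fun p => p.1 == row.1) := by
      simp only [PySem.Dict.contains]
      exact pv_any_map_vals g.items row.1
    by_cases hc : g.items.any (fun p => p.1 == row.1) = true
    · -- key already present
      cases hf : g.items.find? (fun p => p.1 == row.1) with
      | none =>
        rcases List.any_eq_true.mp hc with ⟨p, hp, hpk⟩
        exact absurd (List.find?_eq_none.mp hf p hp) (by simpa using hpk)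
      | some pr =>
        have hpk : (pr.1 == row.1) = true := List.find?_some (p := fun q : String × List (List (String × String)) => q.1 == row.1) hf
        have hpr1 : pr.1 = row.1 := by simpa using hpk
        have hesne : pr.2 ≠ [] := hne pr (List.mem_of_find?_eq_some hf)
        have hfr : g.items.find? (fun p => p.1 == row.1) = some (row.1, pr.2) := by
          rw [hf]; cases pr; simp_all
        -- A's current best for this key
        have hgetA : (PySem.Dict.mk (pvMapVals g.items)).get? row.1 = some (pvSel pr.2) := by
          simp only [PySem.Dict.get?, pv_find?_map_vals, hfr, Option.map_some]
        -- B's step: overwrite the group with its extension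
        have hmod : (g.modify row.1 [] (· ++ [pvEntry row])).items
            = g.items.map (fun p => if p.1 == row.1 then (row.1, pr.2 ++ [pvEntry row]) else p) := by
          simp only [PySem.Dict.modify, PySem.Dict.insert, PySem.Dict.getD, PySem.Dict.get?,
            PySem.Dict.contains, hc, if_pos, hfr, Option.map_some, Option.getD_some]
        -- the selected entry of the extended group
        have hmaxes : PySem.List.max? pr.2 pvHier = some (pvSel pr.2) := by
          cases hm : PySem.List.max? pr.2 pvHier with
          | none => exact absurd ((PySem.List.max?_eq_none_iff pr.2 pvHier).mp hm) hesne
          | some m => simp [pvSel, hm]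
        have hselext : pvSel (pr.2 ++ [pvEntry row])
            = if pvHier (pvSel pr.2) < pvHier (pvEntry row) then pvEntry row else pvSel pr.2 := by
          have h1 : PySem.List.max? (pr.2 ++ [pvEntry row]) pvHier
              = if pvHier (pvSel pr.2) < pvHier (pvEntry row) then some (pvEntry row) else some (pvSel pr.2) := by
            rw [pv_max?_append, hmaxes]
          show (PySem.List.max? (pr.2 ++ [pvEntry row]) pvHier).getD [] = _
          rw [h1]
          by_cases hlt : pvHier (pvSel pr.2) < pvHier (pvEntry row) <;> simp [hlt]
        rw [hcontains, hc, hgetA, hmod, pv_mapVals_replace, hselext]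
        by_cases hlt : pvHier (pvSel pr.2) < pvHier (pvEntry row)
        · -- higher hierarchy: A overwrites too
          rw [if_pos (by simp [hlt]), if_pos hlt]
          simp only [PySem.Dict.insert, PySem.Dict.contains, pv_any_map_vals, hc, if_pos]
        · -- not higher: A keeps its dict; B's overwrite writes the same value back
          rw [if_neg (by simp [hlt]), if_neg hlt]
          have hndm : ((pvMapVals g.items).map (·.1)).Nodup := by
            simpa [pvMapVals, List.map_map] using hnd
          have hfm : (pvMapVals g.items).find? (fun p => p.1 == row.1) = some (row.1, pvSel pr.2) := by
            simp only [pv_find?_map_vals, hfr, Option.map_some]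
          rw [pv_replace_self _ _ _ hndm hfm]
    · -- new key: both append
      have hcf : g.items.any (fun p => p.1 == row.1) = false := Bool.eq_false_iff.mpr hc
      have hfind : g.items.find? (fun p => p.1 == row.1) = none := by
        rw [List.find?_eq_none]
        intro p hp
        simpa using (List.any_eq_false.mp hcf) p hp
      rw [hcontains, hcf]
      rw [if_pos (by simp)]
      have hmod : (g.modify row.1 [] (· ++ [pvEntry row])).items = g.items ++ [(row.1, [pvEntry row])] := by
        simp only [PySem.Dict.modify, PySem.Dict.insert, PySem.Dict.getD, PySem.Dict.get?,
          PySem.Dict.contains, hcf, hfind, Option.map_none, Option.getD_none]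
        simp
      rw [hmod, pv_mapVals_append]
      simp only [PySem.Dict.insert, PySem.Dict.contains, pv_any_map_vals, hcf]
      simp [pvMapVals, pvSel_single]

-- B's grouping dict keeps unique keys and nonempty groups
theorem pv_inv (g : PySem.Dict String (List (List (String × String))))
    (row : String × String × String × String × String)
    (hnd : (g.items.map (·.1)).Nodup) (hne : ∀ p ∈ g.items, p.2 ≠ []) :
    (((pvStepB g row).items.map (·.1)).Nodup) ∧ (∀ p ∈ (pvStepB g row).items, p.2 ≠ []) := by
  by_cases hskip : PySem.Str.lower row.1 = "share name"
  · unfold pvStepB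
    rw [if_pos hskip]
    exact ⟨hnd, hne⟩
  · unfold pvStepB
    rw [if_neg hskip]
    simp only [PySem.Dict.modify, PySem.Dict.insert]
    by_cases hc : g.contains row.1 = true
    · rw [if_pos hc]
      constructor
      · have : (List.map (fun p => if (p.1 == row.1) = true then (row.1, g.getD row.1 [] ++ [pvEntry row]) else p) g.items).map (·.1) = g.items.map (·.1) := by
          simp only [List.map_map]
          apply List.map_congr_left
          intro p _
          by_cases h : p.1 = row.1 <;> simp [h]
        rw [this]; exact hnd
      · intro p hp
        rcases List.mem_map.mp hp with ⟨q, hq, hqe⟩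
        by_cases h : (q.1 == row.1) = true
        · rw [if_pos h] at hqe; subst hqe; simp
        · rw [if_neg h] at hqe; subst hqe; exact hne q hq
    · rw [if_neg hc]
      have hkn : row.1 ∉ g.items.map (·.1) := by
        intro hmem
        apply hc
        simp only [PySem.Dict.contains, List.any_eq_true]
        rcases List.mem_map.mp hmem with ⟨q, hq, hqe⟩
        exact ⟨q, hq, by simp [hqe]⟩
      constructor
      · rw [List.map_append]
        refine List.Nodup.append hnd (by simp) ?_
        intro a ha hmem
        simp at hmem
        exact hkn (by simpa [hmem] using ha)
      · intro p hp
        rcases List.mem_append.mp hp with h | h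
        · exact hne p h
        · simp at h; subst h; simp
        
theorem pv_loop (rs : List (String × String × String × String × String)) :
    ∀ g : PySem.Dict String (List (List (String × String))),
      (g.items.map (·.1)).Nodup → (∀ p ∈ g.items, p.2 ≠ []) →
      (rs.foldl pvStepA (PySem.Dict.mk (pvMapVals g.items))).items
        = pvMapVals ((rs.foldl pvStepB g).items) := by
  induction rs with
  | nil => intro g _ _; rfl
  | cons row rs ih =>
    intro g hnd hne
    simp only [List.foldl_cons]
    rw [pv_step g row hnd hne]
    rcases pv_inv g row hnd hne with ⟨hnd', hne'⟩
    exact ih (pvStepB g row) hnd' hne'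

-- ===== VERDICT (by name: the statement is the Claim_ definition above) =====
theorem condense_share_info_spec : Claim_equal_condense_share_info := by
  intro rs _
  show condense_share_info rs = condense_share_info_alt rs
  have h := pv_loop rs PySem.Dict.empty (by simp [PySem.Dict.empty]) (by simp [PySem.Dict.empty])
  have ha : condense_share_info rs = (rs.foldl pvStepA (PySem.Dict.mk (pvMapVals PySem.Dict.empty.items))).items := rfl
  have hb : condense_share_info_alt rs = pvMapVals ((rs.foldl pvStepB PySem.Dict.empty).items) := rfl
  rw [ha, hb, h]
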